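-- pv_equiv track=rewrite | github.com/guldemirel/hamming-sec-ded-simulator | hamming_gui.py | set_parity_bits
-- ===== SOURCE A (Python) =====
-- def set_parity_bits(hamming):
--     n = len(hamming)
--     for i in range(n):
--         if (i+1) & i == 0:
--             parity_pos = i + 1
--             parity = 0
--             for j in range(1, n+1):
--                 if j & parity_pos and j != parity_pos:
--                     parity ^= hamming[-j]
--             hamming[-(i+1)] = parity
--     return hamming
-- ===== SOURCE B (Python) =====
-- def set_parity_bits(hamming):
--     n = len(hamming)
--     # one table slot per parity (power-of-two) position <= n
--     parity = {}
--     p = 1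
--     while p <= n:
--         parity[p] = 0
--         p <<= 1
--     # single pass over the data bits: each non-power-of-two position j
--     # accumulates into every parity slot p whose bit it covers (j & p)
--     for j in range(1, n + 1):
--         if j & (j - 1):
--             v = hamming[-j]
--             for p in parity:
--                 if j & p:
--                     parity[p] ^= v
--     for p in parity:
--         hamming[-p] = parity[p]
--     return hamming
-- ===== Notes on version B (the rewrite author's own statement) =====
-- stated objective: alternative
-- what changed: Instead of rescanning the whole list once per parity position, B builds a table of parity accumulators keyed by the power-of-two positions and makes a single pass over the data positions, XOR-ing each non-power-of-two element into every parity slot its index covers, then writes the table back.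
import Mathlib
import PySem

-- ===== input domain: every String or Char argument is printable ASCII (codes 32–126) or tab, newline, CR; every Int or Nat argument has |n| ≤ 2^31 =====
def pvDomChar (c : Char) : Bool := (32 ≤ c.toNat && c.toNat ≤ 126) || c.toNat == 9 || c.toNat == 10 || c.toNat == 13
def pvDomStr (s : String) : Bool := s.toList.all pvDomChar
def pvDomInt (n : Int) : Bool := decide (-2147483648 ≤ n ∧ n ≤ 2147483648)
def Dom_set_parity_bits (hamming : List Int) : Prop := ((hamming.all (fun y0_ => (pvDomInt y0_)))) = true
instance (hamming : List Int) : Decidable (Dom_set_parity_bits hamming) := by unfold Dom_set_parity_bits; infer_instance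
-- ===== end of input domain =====

-- B replaces A's per-parity full rescan by a table of parity accumulators filled in one
-- pass over the data positions (objective: alternative decomposition, similar cost).
-- Like A, the Python B mutates `hamming` in place; the equivalence proved is about the
-- returned list (both return the mutated argument with the same contents).


-- ===== PORT A =====
-- inner loop of A: `for j in range(1, n+1): if j & parity_pos and j != parity_pos: parity ^= hamming[-j]`
-- range(1, n+1) is ported as List.range' 1 n (exact); hamming[-j] with 1 ≤ j ≤ n is index n - j,
-- always in range, so `getD (n - j) 0` is exact.
def spbInnerA (h : List Int) (n p : Nat) : Int :=
  (List.range' 1 n).foldl (fun parity j =>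
    if j &&& p ≠ 0 ∧ j ≠ p then PySem.Int.bxor parity (h.getD (n - j) 0) else parity) 0

def set_parity_bits (hamming : List Int) : List Int :=
  let n := hamming.length
  (List.range n).foldl (fun h i =>
    if (i + 1) &&& i == 0 then h.set (n - (i + 1)) (spbInnerA h n (i + 1)) else h) hamming

-- ===== PORT B =====
-- `p = 1; while p <= n: parity[p] = 0; p <<= 1` — collects the power-of-two keys in order;
-- the `1 ≤ p` side of the guard only makes the recursion total (p starts at 1 and doubles).
def spbPows (n p : Nat) : List Nat :=
  if h : 1 ≤ p ∧ p ≤ n then p :: spbPows n (2 * p) else []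
  termination_by n + 1 - p
  decreasing_by omega

-- `for p in parity: if j & p: parity[p] ^= v` — one in-place sweep over the table
def spbBump (tbl : List (Nat × Int)) (j : Nat) (v : Int) : List (Nat × Int) :=
  tbl.map (fun pa => if j &&& pa.1 ≠ 0 then (pa.1, PySem.Int.bxor pa.2 v) else pa)

def set_parity_bits_alt (hamming : List Int) : List Int :=
  let n := hamming.length
  let init : List (Nat × Int) := (spbPows n 1).map (fun p => (p, 0))
  let tbl := (List.range' 1 n).foldl (fun t j =>
    if j &&& (j - 1) ≠ 0 then spbBump t j (hamming.getD (n - j) 0) else t) init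
  tbl.foldl (fun h pv => h.set (n - pv.1) pv.2) hamming

-- ===== PRECONDITION & SPEC =====
def Spec_set_parity_bits (hamming : List Int) (out : List Int) : Prop := out = set_parity_bits_alt hamming
instance (hamming : List Int) (out : List Int) : Decidable (Spec_set_parity_bits hamming out) := by unfold Spec_set_parity_bits; infer_instance

-- ===== CLAIM (what is proved, stated in full; the proofs are below) =====
def Claim_equal_set_parity_bits : Prop := ∀ (hamming : List Int), Dom_set_parity_bits hamming → Spec_set_parity_bits hamming (set_parity_bits hamming)

-- ===== LEMMAS AND PROOFS =====

-- the value both sides compute for parity position p, reading the ORIGINAL list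
def spbVB (h : List Int) (n p : Nat) : Int :=
  (List.range' 1 n).foldl (fun acc j =>
    if j &&& (j - 1) ≠ 0 ∧ j &&& p ≠ 0 then PySem.Int.bxor acc (h.getD (n - j) 0) else acc) 0

-- the power-of-two positions A writes, in increasing order
def spbListA (n : Nat) : List Nat :=
  ((List.range n).filter (fun i => (i + 1) &&& i == 0)).map (· + 1)

-- ---- generic fold lemmas ----
theorem spb_foldl_congr {α β : Type} (l : List β) (f g : α → β → α) (a : α)
    (h : ∀ (x : β), x ∈ l → ∀ (acc : α), f acc x = g acc x) :
    l.foldl f a = l.foldl g a := by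
  induction l generalizing a with
  | nil => rfl
  | cons x xs ih =>
    simp only [List.foldl_cons]
    rw [h x (by simp), ih]
    intro y hy acc; exact h y (by simp [hy]) acc

-- ---- bit lemmas ----
theorem spb_and_testBit {a b : Nat} (h : a &&& b = 0) (i : Nat) :
    ¬(a.testBit i = true ∧ b.testBit i = true) := by
  intro ⟨ha, hb⟩
  have := Nat.testBit_and a b i
  rw [h] at this
  simp [ha, hb] at this

theorem spb_and_eq_zero {a b : Nat} (h : ∀ i, ¬(a.testBit i = true ∧ b.testBit i = true)) :
    a &&& b = 0 := by
  apply Nat.eq_of_testBit_eq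
  intro i
  simp only [Nat.testBit_and, Nat.zero_testBit, Bool.and_eq_false_iff]
  by_cases ha : a.testBit i = true
  · right; have := h i; simp [ha] at this; simp [this]
  · left; simpa using ha

theorem spb_pow_and_pred (k : Nat) : 2 ^ k &&& (2 ^ k - 1) = 0 := by
  apply spb_and_eq_zero
  intro i ⟨h1, h2⟩
  rw [Nat.testBit_two_pow] at h1
  rw [Nat.testBit_two_pow_sub_one] at h2
  simp at h1 h2
  omega

theorem spb_pow_and_pow {a b : Nat} (h : 2 ^ a &&& 2 ^ b ≠ 0) : a = b := by
  by_contra hne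
  apply h
  apply spb_and_eq_zero
  intro i ⟨h1, h2⟩
  rw [Nat.testBit_two_pow] at h1 h2
  simp at h1 h2
  omega

-- j ≥ 1 with j & (j-1) = 0 is a power of two
theorem spb_pow_of_and_pred : ∀ j : Nat, 0 < j → j &&& (j - 1) = 0 → ∃ k, j = 2 ^ k := by
  intro j
  induction j using Nat.strong_induction_on with
  | _ j ih =>
    intro hj h
    match j, hj with
    | 1, _ => exact ⟨0, rfl⟩
    | (j + 2), _ =>
      rcases Nat.even_or_odd (j + 2) with he | ho
      · -- even: halve and recurse
        obtain ⟨m, hm⟩ := he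
        have hm2 : j + 2 = 2 * m := by omega
        have hmpos : 0 < m := by omega
        have hhalf : m &&& (m - 1) = 0 := by
          apply spb_and_eq_zero
          intro i ⟨h1, h2⟩
          refine spb_and_testBit h (i + 1) ⟨?_, ?_⟩
          · rw [Nat.testBit_add_one, hm2]
            simpa [Nat.mul_div_cancel_left] using h1
          · rw [Nat.testBit_add_one]
            have : (j + 2 - 1) / 2 = m - 1 := by omega
            rw [this]; exact h2
        obtain ⟨k, hk⟩ := ih m (by omega) hmpos hhalf
        exact ⟨k + 1, by rw [hm2, hk]; ring⟩
      · -- odd ≥ 3: j+2 and j+1 share a bit above position 0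
        exfalso
        obtain ⟨c, hc⟩ := ho
        have hdiv : (j + 2) / 2 = (j + 1) / 2 := by omega
        have hpos : 0 < (j + 2) / 2 := by omega
        have hex : ∃ i, ((j + 2) / 2).testBit i = true := by
          by_contra hcn
          have h0 := Nat.zero_of_testBit_eq_false (n := (j + 2) / 2) (fun i => by
            cases hbit : ((j + 2) / 2).testBit i with
            | false => rfl
            | true => exact absurd ⟨i, hbit⟩ hcn)
          omega
        obtain ⟨i, hi⟩ := hex
        refine spb_and_testBit h (i + 1) ⟨?_, ?_⟩
        · rw [Nat.testBit_add_one]; exact hi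
        · have : j + 2 - 1 = j + 1 := by omega
          rw [this, Nat.testBit_add_one, ← hdiv]; exact hi

-- the two selection conditions agree when p is a power of two
theorem spb_cond_iff {p : Nat} (k : Nat) (hp : p = 2 ^ k) {j : Nat} (hj : 0 < j) :
    (j &&& p ≠ 0 ∧ j ≠ p) ↔ (j &&& (j - 1) ≠ 0 ∧ j &&& p ≠ 0) := by
  constructor
  · rintro ⟨h1, h2⟩
    refine ⟨?_, h1⟩
    intro hz
    obtain ⟨m, hm⟩ := spb_pow_of_and_pred j hj hz
    have hmk : m = k := spb_pow_and_pow (a := m) (b := k) (by rw [← hm, ← hp]; exact h1)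
    exact h2 (by rw [hm, hp, hmk])
  · rintro ⟨h1, h2⟩
    refine ⟨h2, ?_⟩
    intro he
    exact h1 (by rw [he, hp]; exact spb_pow_and_pred k)

-- ---- the list of parity positions ----
theorem spb_pows_succ_base (n p k : Nat) (hp : p = 2 ^ k) (hpn : p = n + 1) :
    spbPows (n + 1) p = spbPows n p ++ (if (n + 1) &&& n == 0 then [n + 1] else []) := by
  have hpow : ((n + 1) &&& n == 0) = true := by
    have h0 := spb_pow_and_pred k
    rw [← hp, hpn] at h0
    simp only [Nat.add_sub_cancel] at h0
    simp [h0]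
  rw [spbPows.eq_def, dif_pos (show 1 ≤ p ∧ p ≤ n + 1 by omega),
      spbPows.eq_def, dif_neg (show ¬(1 ≤ 2 * p ∧ 2 * p ≤ n + 1) by omega),
      spbPows.eq_def, dif_neg (show ¬(1 ≤ p ∧ p ≤ n) by omega), hpow]
  simp [hpn]

theorem spb_pows_succ (n : Nat) :
    ∀ d p k, p = 2 ^ k → p ≤ n + 1 → n + 1 - p ≤ d →
      spbPows (n + 1) p = spbPows n p ++ (if (n + 1) &&& n == 0 then [n + 1] else []) := by
  intro d
  induction d with
  | zero =>
    intro p k hp hle hd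
    exact spb_pows_succ_base n p k hp (by omega)
  | succ d ih =>
    intro p k hp hle hd
    by_cases hpn : p = n + 1
    · exact spb_pows_succ_base n p k hp hpn
    · have hple : p ≤ n := by omega
      have hp1 : 0 < p := by rw [hp]; positivity
      rw [spbPows.eq_def, dif_pos (show 1 ≤ p ∧ p ≤ n + 1 by omega)]
      conv_rhs => rw [spbPows.eq_def]
      rw [dif_pos (show 1 ≤ p ∧ p ≤ n by omega)]
      by_cases h2p : 2 * p ≤ n + 1
      · rw [ih (2 * p) (k + 1) (by rw [hp]; ring) h2p (by omega)]
        simp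
      · rw [spbPows.eq_def, dif_neg (show ¬(1 ≤ 2 * p ∧ 2 * p ≤ n + 1) by omega)]
        conv_rhs => rw [spbPows.eq_def]
        rw [dif_neg (show ¬(1 ≤ 2 * p ∧ 2 * p ≤ n) by omega)]
        have hnp : ¬(((n + 1) &&& n == 0) = true) := by
          intro hb
          have hz : (n + 1) &&& (n + 1 - 1) = 0 := by
            simpa using hb
          obtain ⟨m, hm⟩ := spb_pow_of_and_pred (n + 1) (by omega) hz
          have hkm : k < m := by
            by_contra hge
            have h2 : 2 ^ m ≤ 2 ^ k := Nat.pow_le_pow_right (by norm_num) (by omega)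
            omega
          have h2pn : 2 * p ≤ n + 1 := by
            rw [hp, hm]
            calc 2 * 2 ^ k = 2 ^ (k + 1) := by ring
              _ ≤ 2 ^ m := Nat.pow_le_pow_right (by norm_num) (by omega)
          omega
        simp [hnp]

theorem spbListA_succ (m : Nat) :
    spbListA (m + 1) = spbListA m ++ (if (m + 1) &&& m == 0 then [m + 1] else []) := by
  rw [spbListA, spbListA, List.range_succ, List.filter_append, List.map_append]
  congr 1
  by_cases h : ((m + 1) &&& m == 0) = true
  · rw [List.filter_cons_of_pos (by simpa using h)]
    simp [h]
  · rw [List.filter_cons_of_neg (by simpa using h)]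
    simp [h]

theorem spb_listA_eq_pows (n : Nat) : spbListA n = spbPows n 1 := by
  induction n with
  | zero =>
    rw [spbListA, spbPows.eq_def, dif_neg (show ¬(1 ≤ 1 ∧ 1 ≤ 0) by omega)]
    simp
  | succ n ih =>
    rw [spbListA_succ, ih, spb_pows_succ n n 1 0 rfl (by omega) (by omega)]

-- membership in spbPows gives a power of two in range
theorem spb_mem_pows (n : Nat) :
    ∀ d p k q, p = 2 ^ k → n + 1 - p ≤ d → q ∈ spbPows n p →
      (∃ m, q = 2 ^ m) ∧ 1 ≤ q ∧ q ≤ n := by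
  intro d
  induction d with
  | zero =>
    intro p k q hp hd hq
    rw [spbPows.eq_def, dif_neg (show ¬(1 ≤ p ∧ p ≤ n) by omega)] at hq
    simp at hq
  | succ d ih =>
    intro p k q hp hd hq
    rw [spbPows.eq_def] at hq
    by_cases h : 1 ≤ p ∧ p ≤ n
    · rw [dif_pos h] at hq
      rcases List.mem_cons.mp hq with he | ht
      · exact ⟨⟨k, by rw [he, hp]⟩, by omega, by omega⟩
      · exact ih (2 * p) (k + 1) q (by rw [hp]; ring) (by omega) ht
    · rw [dif_neg h] at hq
      simp at hq

-- ---- B characterisation ----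
theorem spb_B_table (hamming : List Int) (n : Nat) :
    ∀ (js : List Nat) (ks : List (Nat × Int)),
      js.foldl (fun t j => if j &&& (j - 1) ≠ 0 then spbBump t j (hamming.getD (n - j) 0) else t) ks
      = ks.map (fun pa => (pa.1, js.foldl (fun acc j =>
          if j &&& (j - 1) ≠ 0 ∧ j &&& pa.1 ≠ 0 then PySem.Int.bxor acc (hamming.getD (n - j) 0) else acc) pa.2)) := by
  intro js
  induction js with
  | nil => intro ks; simp
  | cons j js ih =>
    intro ks
    simp only [List.foldl_cons]
    have hstep : (if j &&& (j - 1) ≠ 0 then spbBump ks j (hamming.getD (n - j) 0) else ks)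
        = ks.map (fun pa => (pa.1,
            if j &&& (j - 1) ≠ 0 ∧ j &&& pa.1 ≠ 0 then PySem.Int.bxor pa.2 (hamming.getD (n - j) 0) else pa.2)) := by
      by_cases hc : j &&& (j - 1) ≠ 0
      · rw [if_pos hc, spbBump]
        apply List.map_congr_left
        intro pa _
        by_cases hp : j &&& pa.1 ≠ 0
        · rw [if_pos hp, if_pos ⟨hc, hp⟩]
        · rw [if_neg hp, if_neg (by tauto)]
      · rw [if_neg hc]
        conv_lhs => rw [← List.map_id ks]
        apply List.map_congr_left
        intro pa _
        rw [if_neg (by tauto)]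
        simp
    rw [hstep, ih, List.map_map]
    rfl

-- ---- A: reads during the scan never touch positions written so far ----
theorem spb_writes_getD (v : Nat → Int) (n : Nat) :
    ∀ (L : List Nat) (h : List Int) (x : Int) (idx : Nat), (∀ p ∈ L, n - p ≠ idx) →
      (L.foldl (fun h p => h.set (n - p) (v p)) h).getD idx x = h.getD idx x := by
  intro L
  induction L with
  | nil => intro h x idx _; rfl
  | cons q L ih =>
    intro h x idx hne
    simp only [List.foldl_cons]
    rw [ih _ x idx (fun p hp => hne p (by simp [hp]))]
    have hq : n - q ≠ idx := hne q (by simp)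
    simp [List.getD_eq_getElem?_getD, List.getElem?_set_ne hq]

theorem spb_inner_stable (hamming : List Int) (n : Nat) (L : List Nat)
    (hL : ∀ p ∈ L, 1 ≤ p ∧ p ≤ n ∧ p &&& (p - 1) = 0)
    {q : Nat} (k : Nat) (hq : q = 2 ^ k) :
    spbInnerA (L.foldl (fun h p => h.set (n - p) (spbInnerA hamming n p)) hamming) n q
      = spbInnerA hamming n q := by
  rw [spbInnerA, spbInnerA]
  apply spb_foldl_congr
  intro j hj acc
  have hjr : 1 ≤ j ∧ j ≤ n := by
    rw [List.mem_range'] at hj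
    obtain ⟨i, hi, he⟩ := hj
    omega
  by_cases hc : j &&& q ≠ 0 ∧ j ≠ q
  · rw [if_pos hc, if_pos hc]
    congr 1
    apply spb_writes_getD
    intro p hp
    obtain ⟨hp1, hp2, hp3⟩ := hL p hp
    -- j is selected, hence not a power of two; p is one, so p ≠ j
    have hjnp : j &&& (j - 1) ≠ 0 := ((spb_cond_iff k hq (by omega)).mp hc).1
    have hpj : p ≠ j := by
      intro he; rw [he] at hp3; exact hjnp hp3
    omega
  · rw [if_neg hc, if_neg hc]

-- an inner value computed on the two selection conditions agrees for power-of-two p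
theorem spb_V_eq (hamming : List Int) (n : Nat) {p : Nat} (k : Nat) (hk : p = 2 ^ k) :
    spbInnerA hamming n p = spbVB hamming n p := by
  rw [spbInnerA, spbVB]
  apply spb_foldl_congr
  intro j hj a
  have hjr : 1 ≤ j := by
    rw [List.mem_range'] at hj
    obtain ⟨i, hi, he⟩ := hj
    omega
  by_cases hc : j &&& p ≠ 0 ∧ j ≠ p
  · rw [if_pos hc, if_pos ((spb_cond_iff k hk (by omega)).mp hc)]
  · rw [if_neg hc, if_neg (fun h => hc ((spb_cond_iff k hk (by omega)).mpr h))]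

-- members of spbListA are power-of-two positions in range
theorem spb_mem_listA (m n : Nat) (hmn : m ≤ n) :
    ∀ p ∈ spbListA m, 1 ≤ p ∧ p ≤ n ∧ p &&& (p - 1) = 0 := by
  intro p hp
  rw [spbListA] at hp
  simp only [List.mem_map, List.mem_filter, List.mem_range] at hp
  obtain ⟨i, ⟨hir, hip⟩, he⟩ := hp
  refine ⟨by omega, by omega, ?_⟩
  have h2 : (i + 1) &&& i = 0 := by simpa using hip
  rw [← he]
  simpa using h2

-- A's fold equals writing the original-list parity values at the power positions
theorem spb_A_char (hamming : List Int) :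
    ∀ m, m ≤ hamming.length →
      (List.range m).foldl (fun h i =>
          if (i + 1) &&& i == 0 then h.set (hamming.length - (i + 1)) (spbInnerA h hamming.length (i + 1)) else h) hamming
      = (spbListA m).foldl (fun h p => h.set (hamming.length - p) (spbInnerA hamming hamming.length p)) hamming := by
  intro m
  induction m with
  | zero => intro _; rfl
  | succ m ih =>
    intro hm
    rw [List.range_succ, List.foldl_append, ih (by omega), spbListA_succ, List.foldl_append]
    by_cases hc : ((m + 1) &&& m == 0) = true
    · have hz : (m + 1) &&& (m + 1 - 1) = 0 := by
        simpa using hc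
      obtain ⟨k, hk⟩ := spb_pow_of_and_pred (m + 1) (by omega) hz
      rw [if_pos hc]
      simp only [List.foldl_cons, List.foldl_nil, if_pos hc]
      congr 1
      exact spb_inner_stable hamming hamming.length (spbListA m)
        (spb_mem_listA m hamming.length (by omega)) k hk
    · rw [if_neg hc]
      simp only [List.foldl_cons, List.foldl_nil, if_neg hc]

-- ===== VERDICT (by name: the statement is the Claim_ definition above) =====
theorem set_parity_bits_spec : Claim_equal_set_parity_bits := by
  intro hamming _
  unfold Spec_set_parity_bits
  simp only [set_parity_bits, set_parity_bits_alt]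
  rw [spb_A_char hamming hamming.length (le_refl _)]
  rw [spb_B_table hamming hamming.length]
  simp only [List.map_map, List.foldl_map, Function.comp]
  rw [spb_listA_eq_pows]
  apply spb_foldl_congr
  intro p hp acc
  obtain ⟨⟨k, hk⟩, hp1, hpn⟩ :=
    spb_mem_pows hamming.length hamming.length 1 0 p rfl (by omega) hp
  rw [spb_V_eq hamming hamming.length k hk]
  rfl
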